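-- pv_equiv track=rewrite | github.com/LeonardoCMelo/Exercicios-Aulas-Programacao-Computadores | Aula09/Aula09-Exercicio04.py | exercicio_4
-- ===== SOURCE A (Python) =====
-- def exercicio_4(tupla: tuple[int]):
--     """
--     Separa os números pares e ímpares de uma tupla de inteiros.
--
--     Retorna uma lista contendo duas tuplas:
--     - A primeira com todos os números pares.
--     - A segunda com todos os números ímpares.
--     Se a tupla de entrada for vazia, retorna uma lista vazia.
--
--     Args:
--         tupla (tuple[int]): Tupla de números inteiros a ser processada.
--
--     Returns:
--         list[tuple[int]]: Lista com duas tuplas (pares, ímpares).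
--         Caso a tupla de entrada seja vazia, retorna uma lista vazia.
--     """
--     if len(tupla) == 0:
--         lista = []
--     else:
--         tuplaPar = tuple()
--         tuplaImpar = tuple()
--         for i in tupla:
--             if i%2 == 0:
--                 tuplaPar += (i,)
--             else:
--                 tuplaImpar += (i,)
--         lista = [tuplaPar,tuplaImpar]
--     return lista
-- ===== SOURCE B (Python) =====
-- def exercicio_4(tupla: tuple[int]):
--     """Two independent filter passes instead of a single dispatch loop."""
--     if len(tupla) == 0:
--         return []
--     pares = tuple(i for i in tupla if i % 2 == 0)
--     impares = tuple(i for i in tupla if i % 2 != 0)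
--     return [pares, impares]
-- ===== Notes on version B (the rewrite author's own statement) =====
-- stated objective: idiomatic
-- what changed: Replaces the single-pass if/else dispatch that appends to two growing tuples with two independent filter comprehensions over the input.
import Mathlib
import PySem

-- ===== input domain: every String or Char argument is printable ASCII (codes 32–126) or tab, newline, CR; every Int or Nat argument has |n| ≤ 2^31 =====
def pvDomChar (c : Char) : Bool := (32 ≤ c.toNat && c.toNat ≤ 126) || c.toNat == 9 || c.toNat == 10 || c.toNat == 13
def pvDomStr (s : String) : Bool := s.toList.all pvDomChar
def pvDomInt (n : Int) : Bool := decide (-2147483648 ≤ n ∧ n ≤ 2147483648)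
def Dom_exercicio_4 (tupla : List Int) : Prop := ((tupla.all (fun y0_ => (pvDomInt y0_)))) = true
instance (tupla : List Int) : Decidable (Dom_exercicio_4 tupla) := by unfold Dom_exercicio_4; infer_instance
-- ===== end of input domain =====

-- ===== PORT A =====
-- Literal port of A: single loop dispatching each element onto one of two
-- accumulated tuples (tuplaPar, tuplaImpar), appended one element at a time.
def exercicio_4 (tupla : List Int) : List (List Int) :=
  if tupla.length = 0 then []
  else
    let p := tupla.foldl (fun (st : List Int × List Int) i =>
      if i % 2 = 0 then (st.1 ++ [i], st.2) else (st.1, st.2 ++ [i])) ([], [])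
    [p.1, p.2]

-- ===== PORT B =====
-- Port of B: empty guard, then two independent filter passes.
def exercicio_4_alt (tupla : List Int) : List (List Int) :=
  if tupla.length = 0 then []
  else [tupla.filter (fun i => i % 2 = 0), tupla.filter (fun i => i % 2 ≠ 0)]

-- ===== PRECONDITION & SPEC =====
def Spec_exercicio_4 (tupla : List Int) (out : List (List Int)) : Prop := out = exercicio_4_alt tupla
instance (tupla : List Int) (out : List (List Int)) : Decidable (Spec_exercicio_4 tupla out) := by unfold Spec_exercicio_4; infer_instance

-- ===== CLAIM (what is proved, stated in full; the proofs are below) =====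
def Claim_equal_exercicio_4 : Prop := ∀ (tupla : List Int), Dom_exercicio_4 tupla → Spec_exercicio_4 tupla (exercicio_4 tupla)

-- ===== LEMMAS AND PROOFS =====

-- ===== VERDICT (by name: the statement is the Claim_ definition above) =====
-- Loop invariant: the fold starting from accumulators (a, b) produces
-- (a ++ evens, b ++ odds).
theorem exercicio_4_fold (tupla a b : List Int) :
    tupla.foldl (fun (st : List Int × List Int) i =>
      if i % 2 = 0 then (st.1 ++ [i], st.2) else (st.1, st.2 ++ [i])) (a, b)
    = (a ++ tupla.filter (fun i => i % 2 = 0),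
       b ++ tupla.filter (fun i => i % 2 ≠ 0)) := by
  induction tupla generalizing a b with
  | nil => simp
  | cons x xs ih =>
    simp only [List.foldl_cons, List.filter_cons]
    by_cases h : x % 2 = 0
    · rw [if_pos h, ih]
      simp [h]
    · rw [if_neg h, ih]
      simp [h]

theorem exercicio_4_spec : Claim_equal_exercicio_4 := by
  intro tupla _
  unfold Spec_exercicio_4 exercicio_4 exercicio_4_alt
  split
  · rfl
  · rw [exercicio_4_fold]
    simp
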